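-- pv_equiv track=rewrite | github.com/Jyoungho/TIL | algorithm/py/programers/level1/overpainting.py | solution
-- ===== SOURCE A (Python) =====
-- def solution(n, m, section):
--     answer = 0
--     left = 0
--
--     while (True):
--         if left < section[0]:
--             left = section.pop(0) + m - 1
--             answer += 1
--         else:
--             section.pop(0)
--
--         if len(section) == 0: break
--
--     return answer
-- ===== SOURCE B (Python) =====
-- def solution(n, m, section):
--     # One pass, no mutation: collect the start of each new stroke instead of
--     # repeatedly popping from the front of the list.
--     starts = []
--     for x in section:
--         covered = starts[-1] + m - 1 if starts else 0
--         if x > covered: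
--             starts.append(x)
--     return len(starts)
-- ===== Notes on version B (the rewrite author's own statement) =====
-- stated objective: faster
-- what changed: B replaces A's destructive while-True loop that pops the front of the list (O(n) per pop) and tracks a painted boundary with a single non-mutating pass that collects the start positions of the strokes and returns their count.
import Mathlib
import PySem

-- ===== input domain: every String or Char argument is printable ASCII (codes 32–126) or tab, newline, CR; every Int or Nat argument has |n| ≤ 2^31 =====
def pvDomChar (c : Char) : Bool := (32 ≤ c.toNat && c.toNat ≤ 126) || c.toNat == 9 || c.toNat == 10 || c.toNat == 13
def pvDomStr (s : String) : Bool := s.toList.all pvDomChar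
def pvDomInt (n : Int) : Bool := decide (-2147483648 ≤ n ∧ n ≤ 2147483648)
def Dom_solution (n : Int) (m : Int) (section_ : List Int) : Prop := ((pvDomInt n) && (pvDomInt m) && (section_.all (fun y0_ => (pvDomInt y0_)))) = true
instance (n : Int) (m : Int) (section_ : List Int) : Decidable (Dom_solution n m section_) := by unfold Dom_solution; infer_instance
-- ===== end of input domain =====

-- B removes A's destructive front-pops: one non-mutating pass collecting stroke starts.
-- (A empties `section` in place; B leaves it untouched — equivalence here is about the return value.)

-- ===== PORT A =====
-- A's while-True loop pops the head each iteration and breaks when the list is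
-- empty; that is structural recursion on the list, `break` = returning `answer`
-- when the popped tail is empty (same as recursing into []).
def solutionLoop (m : Int) : List Int → Int → Int → Int
  | [], _, answer => answer
  | x :: rest, left, answer =>
      if left < x then solutionLoop m rest (x + m - 1) (answer + 1)
      else solutionLoop m rest left answer

def solution (n : Int) (m : Int) (section_ : List Int) : Int :=
  solutionLoop m section_ 0 0

-- ===== PORT B =====
def solutionStep (m : Int) (starts : List Int) (x : Int) : List Int :=
  let covered := if starts = [] then 0 else starts.getLastD 0 + m - 1
  if x > covered then starts ++ [x] else starts

def solution_alt (n : Int) (m : Int) (section_ : List Int) : Int :=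
  (section_.foldl (solutionStep m) []).length

-- ===== PRECONDITION & SPEC =====
-- Pre_ excludes only the empty list, on which Python A raises IndexError (section[0]).
def Pre_solution (n : Int) (m : Int) (section_ : List Int) : Prop := section_ ≠ []
instance (n : Int) (m : Int) (section_ : List Int) : Decidable (Pre_solution n m section_) := by unfold Pre_solution; infer_instance
def pvWitness_solution : Int × Int × List Int := (5, 2, [1, 3, 4])

def Spec_solution (n : Int) (m : Int) (section_ : List Int) (out : Int) : Prop := out = solution_alt n m section_
instance (n : Int) (m : Int) (section_ : List Int) (out : Int) : Decidable (Spec_solution n m section_ out) := by unfold Spec_solution; infer_instance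

-- ===== CLAIM (what is proved, stated in full; the proofs are below) =====
def Claim_equal_solution : Prop := ∀ (n : Int) (m : Int) (section_ : List Int), Dom_solution n m section_ → Pre_solution n m section_ → Spec_solution n m section_ (solution n m section_)

-- ===== LEMMAS AND PROOFS =====

-- A's loop state (left, answer) is determined by B's accumulated stroke starts:
-- left = covered boundary of the last stroke (0 if none), answer = number of strokes.
lemma loop_fold (m : Int) (xs : List Int) : ∀ starts : List Int,
    solutionLoop m xs (if starts = [] then 0 else starts.getLastD 0 + m - 1) (starts.length : Int)
      = ((List.foldl (solutionStep m) starts xs).length : Int) := by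
  induction xs with
  | nil => intro starts; simp [solutionLoop]
  | cons x rest ih =>
    intro starts
    by_cases h : (if starts = [] then 0 else starts.getLastD 0 + m - 1) < x
    · have hx := ih (starts ++ [x])
      rw [List.foldl_cons]
      simp only [solutionLoop, if_pos h]
      simp only [solutionStep, gt_iff_lt, if_pos h]
      simpa [List.getLastD_concat] using hx
    · have hx := ih starts
      rw [List.foldl_cons]
      simp only [solutionLoop, if_neg h]
      simp only [solutionStep, gt_iff_lt, if_neg h]
      exact hx

-- ===== VERDICT (by name: the statement is the Claim_ definition above) =====
theorem solution_spec : Claim_equal_solution := by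
  intro n m section_ _ _
  unfold Spec_solution solution solution_alt
  simpa using loop_fold m section_ []
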